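-- pv_equiv track=rewrite | github.com/cyxfff/icache_test | fit/fitter.py | metric_display_order
-- ===== SOURCE A (Python) =====
-- INTERNAL_TARGET_METRICS = {
--     "l2i_cache_access_proxy_mpki",
--     "l2i_tlb_access_proxy_mpki",
-- }
--
-- def metric_display_order(target):
--     rate_metrics = [
--         "br_miss_rate",
--         "l1i_miss_rate",
--         "l2i_miss_rate",
--         "l1i_tlb_miss_rate",
--         "l2i_tlb_miss_rate",
--     ]
--     mpki_and_raw_metrics = [
--         "br_mis_pred_mpki",
--         "br_retired_mpki",
--         "l1i_cache_mpki",
--         "l1i_cache_refill_mpki",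
--         "l2i_cache_mpki",
--         "l2i_cache_refill_mpki",
--         "l1i_tlb_mpki",
--         "l1i_tlb_refill_mpki",
--         "l2i_tlb_mpki",
--         "l2i_tlb_refill_mpki",
--         "ipc",
--         "instructions:u",
--     ]
--     preferred = rate_metrics + mpki_and_raw_metrics
--     ordered = [metric for metric in preferred if metric in target and metric not in INTERNAL_TARGET_METRICS]
--     for metric in target:
--         if metric not in ordered and metric not in INTERNAL_TARGET_METRICS:
--             ordered.append(metric)
--     return ordered
-- ===== SOURCE B (Python) =====
-- INTERNAL_TARGET_METRICS = {
--     "l2i_cache_access_proxy_mpki",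
--     "l2i_tlb_access_proxy_mpki",
-- }
--
-- def metric_display_order(target):
--     preferred = [
--         "br_miss_rate",
--         "l1i_miss_rate",
--         "l2i_miss_rate",
--         "l1i_tlb_miss_rate",
--         "l2i_tlb_miss_rate",
--         "br_mis_pred_mpki",
--         "br_retired_mpki",
--         "l1i_cache_mpki",
--         "l1i_cache_refill_mpki",
--         "l2i_cache_mpki",
--         "l2i_cache_refill_mpki",
--         "l1i_tlb_mpki",
--         "l1i_tlb_refill_mpki",
--         "l2i_tlb_mpki",
--         "l2i_tlb_refill_mpki",
--         "ipc",
--         "instructions:u",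
--     ]
--     rank = {metric: i for i, metric in enumerate(preferred)}
--     candidates = [m for m in dict.fromkeys(target) if m not in INTERNAL_TARGET_METRICS]
--     return sorted(candidates, key=lambda m: rank.get(m, len(preferred)))
-- ===== Notes on version B (the rewrite author's own statement) =====
-- stated objective: faster
-- what changed: A's two-phase construction (filter the preferred list by membership in target, then an append loop testing membership in the growing output) is replaced by an ordered dedup of target (dict.fromkeys), dropping internal metrics, followed by ONE stable sort under a precomputed rank table (rank.get(m, len(preferred))), relying on sort stability for the non-preferred tail.
import Mathlib
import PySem

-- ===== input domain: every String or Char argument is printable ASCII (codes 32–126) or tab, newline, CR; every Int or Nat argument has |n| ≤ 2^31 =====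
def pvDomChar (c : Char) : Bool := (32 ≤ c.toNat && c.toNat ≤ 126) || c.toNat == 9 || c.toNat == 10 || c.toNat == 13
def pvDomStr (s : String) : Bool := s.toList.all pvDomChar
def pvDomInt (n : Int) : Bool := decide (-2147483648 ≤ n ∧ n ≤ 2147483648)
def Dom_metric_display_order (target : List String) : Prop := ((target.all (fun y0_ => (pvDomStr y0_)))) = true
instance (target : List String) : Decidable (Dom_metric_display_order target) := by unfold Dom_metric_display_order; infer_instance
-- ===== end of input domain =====

-- B replaces A's two-phase scan (preferred-filter pass + append loop testing membership in the
-- growing output, quadratic in the target length) by ordered dedup of target and ONE stable sort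
-- under a rank table (measured faster in a timing run on large inputs).

-- module constant INTERNAL_TARGET_METRICS (a Python set), shared by both ports
def pvInternalMetrics : PySem.Set String :=
  PySem.Set.ofList ["l2i_cache_access_proxy_mpki", "l2i_tlb_access_proxy_mpki"]

-- ===== PORT A =====
def metric_display_order (target : List String) : List String :=
  let rate_metrics : List String :=
    ["br_miss_rate", "l1i_miss_rate", "l2i_miss_rate", "l1i_tlb_miss_rate", "l2i_tlb_miss_rate"]
  let mpki_and_raw_metrics : List String :=
    ["br_mis_pred_mpki", "br_retired_mpki", "l1i_cache_mpki", "l1i_cache_refill_mpki",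
     "l2i_cache_mpki", "l2i_cache_refill_mpki", "l1i_tlb_mpki", "l1i_tlb_refill_mpki",
     "l2i_tlb_mpki", "l2i_tlb_refill_mpki", "ipc", "instructions:u"]
  let preferred := rate_metrics ++ mpki_and_raw_metrics
  let ordered := preferred.filter
    (fun metric => target.contains metric && !(PySem.Set.contains pvInternalMetrics metric))
  target.foldl
    (fun ordered metric =>
      if !(ordered.contains metric) && !(PySem.Set.contains pvInternalMetrics metric) then
        ordered ++ [metric]
      else ordered)
    ordered

-- ===== PORT B =====
-- B's `preferred` list (Source B writes it as one literal list)
def pvPreferred : List String :=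
  ["br_miss_rate", "l1i_miss_rate", "l2i_miss_rate", "l1i_tlb_miss_rate", "l2i_tlb_miss_rate",
   "br_mis_pred_mpki", "br_retired_mpki", "l1i_cache_mpki", "l1i_cache_refill_mpki",
   "l2i_cache_mpki", "l2i_cache_refill_mpki", "l1i_tlb_mpki", "l1i_tlb_refill_mpki",
   "l2i_tlb_mpki", "l2i_tlb_refill_mpki", "ipc", "instructions:u"]

-- rank = {metric: i for i, metric in enumerate(preferred)}
def pvRank : PySem.Dict String Int :=
  (PySem.List.enumerate pvPreferred).foldl (fun d p => d.insert p.2 p.1) PySem.Dict.empty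

-- key = lambda m: rank.get(m, len(preferred))
def pvKey (m : String) : Int := pvRank.getD m (pvPreferred.length : Int)

def metric_display_order_alt (target : List String) : List String :=
  PySem.List.sorted
    ((PySem.List.dedup target).filter (fun m => !(PySem.Set.contains pvInternalMetrics m)))
    pvKey

-- ===== PRECONDITION & SPEC =====
def Spec_metric_display_order (target : List String) (out : List String) : Prop := out = metric_display_order_alt target
instance (target : List String) (out : List String) : Decidable (Spec_metric_display_order target out) := by unfold Spec_metric_display_order; infer_instance

-- ===== CLAIM (what is proved, stated in full; the proofs are below) =====
def Claim_equal_metric_display_order : Prop := ∀ (target : List String), Dom_metric_display_order target → Spec_metric_display_order target (metric_display_order target)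

-- ===== LEMMAS AND PROOFS =====

-- A's first phase as a named list
def pvHead (target : List String) : List String :=
  pvPreferred.filter
    (fun metric => target.contains metric && !(PySem.Set.contains pvInternalMetrics metric))

-- key facts about the rank table
lemma pvKey_lt (m : String) (hm : m ∈ pvPreferred) : pvKey m < 17 := by
  fin_cases hm <;> decide

lemma pvKey_pairwise : pvPreferred.Pairwise (fun a b => pvKey a < pvKey b) := by decide

lemma pvKeys_rank : pvRank.keys = pvPreferred := by decide

lemma pvKey_of_not_mem (m : String) (hm : m ∉ pvPreferred) : pvKey m = 17 := by
  have hc : pvRank.contains m = false := by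
    by_contra h
    exact hm (pvKeys_rank ▸ (PySem.Dict.contains_iff_mem_keys pvRank m).mp
      (by revert h; cases pvRank.contains m <;> simp))
  have hn : pvRank.get? m = none := (PySem.Dict.get?_eq_none_iff_contains pvRank m).mpr hc
  simp [pvKey, PySem.Dict.getD, hn]
  rfl

lemma insertBy_front {α : Type} (before : α → α → Bool) (x : α) (l : List α)
    (h : ∀ y ∈ l, before x y = true) : PySem.List.insertBy before x l = x :: l := by
  cases l with
  | nil => simp [PySem.List.insertBy]
  | cons y ys => simp [PySem.List.insertBy, h y (by simp)]

-- inserting a preferred metric lands at its rank position, before the non-preferred tail T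
lemma pv_insert_pref (x : String) :
    ∀ (ps : List String), ps.Pairwise (fun a b => pvKey a < pvKey b) →
    ∀ (T : List String) (p : String → Bool),
      (∀ y ∈ T, pvKey x < pvKey y) → x ∈ ps → p x = false →
      PySem.List.insertBy (fun a b => decide (pvKey a < pvKey b)) x (ps.filter p ++ T)
        = ps.filter (fun m => p m || m == x) ++ T := by
  intro ps
  induction ps with
  | nil => intro _ T p _ hx _; exact absurd hx (by simp)
  | cons q ps ih =>
    intro hsort T p hT hx hpx
    have hq : ∀ y ∈ ps, pvKey q < pvKey y := by
      intro y hy; exact (List.pairwise_cons.mp hsort).1 y hy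
    have hps : ps.Pairwise (fun a b => pvKey a < pvKey b) := (List.pairwise_cons.mp hsort).2
    rcases List.mem_cons.mp hx with hxq | hxp
    · subst hxq
      have hfront : PySem.List.insertBy (fun a b => decide (pvKey a < pvKey b)) x
          (ps.filter p ++ T) = x :: (ps.filter p ++ T) := by
        apply insertBy_front
        intro y hy
        rcases List.mem_append.mp hy with h1 | h2
        · exact decide_eq_true (hq y (List.mem_of_mem_filter h1))
        · exact decide_eq_true (hT y h2)
      have hps_eq : ps.filter (fun m => p m || m == x) = ps.filter p := by
        apply List.filter_congr
        intro m hm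
        have : m ≠ x := fun h => absurd (hq m hm) (by rw [h]; exact lt_irrefl _)
        simp [beq_eq_false_iff_ne.mpr this]
      simp [hpx, hfront, hps_eq]
    · have hkqx : pvKey q < pvKey x := hq x hxp
      have hqx : q ≠ x := fun h => absurd hkqx (by rw [h]; exact lt_irrefl _)
      have hbef : decide (pvKey x < pvKey q) = false := by
        simp; exact le_of_lt hkqx
      by_cases hpq : p q = true
      · have := ih hps T p hT hxp hpx
        simp [hpq, PySem.List.insertBy, hbef, this]
      · have hpq' : p q = false := by revert hpq; cases p q <;> simp
        have := ih hps T p hT hxp hpx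
        simp [hpq', this, hqx]

-- main invariant of Python's stable insertion sort under the rank key
lemma pv_sort_fold :
    ∀ (xs : List String), xs.Nodup →
    ∀ (T : List String) (p : String → Bool),
      (∀ y ∈ T, pvKey y = 17) → (∀ x ∈ xs, x ∉ T) → (∀ x ∈ xs, p x = false) →
      xs.foldl (fun acc x => PySem.List.insertBy (fun a b => decide (pvKey a < pvKey b)) x acc)
        (pvPreferred.filter p ++ T)
      = pvPreferred.filter (fun m => p m || xs.contains m)
          ++ (T ++ xs.filter (fun m => !pvPreferred.contains m)) := by
  intro xs
  induction xs with
  | nil =>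
    intro _ T p _ _ _
    simp
  | cons x xs ih =>
    intro hnd T p hT hxT hp
    have hndx : xs.Nodup := (List.nodup_cons.mp hnd).2
    have hxnx : x ∉ xs := (List.nodup_cons.mp hnd).1
    have hpx : p x = false := hp x (by simp)
    by_cases hx : x ∈ pvPreferred
    · have hstep : PySem.List.insertBy (fun a b => decide (pvKey a < pvKey b)) x
          (pvPreferred.filter p ++ T) = pvPreferred.filter (fun m => p m || m == x) ++ T := by
        apply pv_insert_pref x pvPreferred pvKey_pairwise T p _ hx hpx
        intro y hy; rw [hT y hy]; exact pvKey_lt x hx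
      have hrec := ih hndx T (fun m => p m || m == x) hT
        (fun x' hx' => hxT x' (by simp [hx']))
        (fun x' hx' => by
          have h1 : p x' = false := hp x' (by simp [hx'])
          have h2 : x' ≠ x := fun h => hxnx (h ▸ hx')
          simp [h1, beq_eq_false_iff_ne.mpr h2])
      have hfc : pvPreferred.filter (fun m => (p m || m == x) || xs.contains m)
          = pvPreferred.filter (fun m => p m || (x :: xs).contains m) := by
        apply List.filter_congr
        intro m _
        by_cases h : m = x
        · simp [h, Bool.or_comm]
        · have hbx : (m == x) = false := beq_eq_false_iff_ne.mpr h
          simp [hbx, h]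
      have htl : (x :: xs).filter (fun m => !pvPreferred.contains m)
          = xs.filter (fun m => !pvPreferred.contains m) := by
        simp [hx]
      simp only [List.foldl_cons, hstep, hrec, hfc, htl]
    · have hkx : pvKey x = 17 := pvKey_of_not_mem x hx
      have hstep : PySem.List.insertBy (fun a b => decide (pvKey a < pvKey b)) x
          (pvPreferred.filter p ++ T) = (pvPreferred.filter p ++ T) ++ [x] := by
        apply PySem.List.insertBy_of_forall_not_before
        intro y hy
        rcases List.mem_append.mp hy with h1 | h2
        · have := pvKey_lt y (List.mem_of_mem_filter h1)
          simp [hkx]; omega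
        · simp [hkx, hT y h2]
      have hrec := ih hndx (T ++ [x]) p
        (fun y hy => by
          rcases List.mem_append.mp hy with h1 | h2
          · exact hT y h1
          · simp at h2; rw [h2]; exact hkx)
        (fun x' hx' => by
          intro hmem
          rcases List.mem_append.mp hmem with h1 | h2
          · exact hxT x' (by simp [hx']) h1
          · simp at h2; exact hxnx (h2 ▸ hx'))
        (fun x' hx' => hp x' (by simp [hx']))
      have hfc : pvPreferred.filter (fun m => p m || xs.contains m)
          = pvPreferred.filter (fun m => p m || (x :: xs).contains m) := by
        apply List.filter_congr
        intro m hm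
        have h2 : m ≠ x := fun h => hx (h ▸ hm)
        simp [h2]
      have htl : (x :: xs).filter (fun m => !pvPreferred.contains m)
          = x :: xs.filter (fun m => !pvPreferred.contains m) := by
        simp [hx]
      simp only [List.foldl_cons, hstep, List.append_assoc, List.singleton_append, hrec, hfc, htl]

-- A's append loop keeps the shape  head ++ (seen-set filtered to new non-preferred metrics)
lemma pv_A_fold (target : List String) :
    ∀ (ts : List String), (∀ m ∈ ts, m ∈ target) → ∀ (s : List String),
      ts.foldl
        (fun ordered metric =>
          if !(ordered.contains metric) && !(PySem.Set.contains pvInternalMetrics metric) then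
            ordered ++ [metric]
          else ordered)
        (pvHead target ++ s.filter
          (fun m => !(PySem.Set.contains pvInternalMetrics m) && !pvPreferred.contains m))
      = pvHead target ++ (ts.foldl PySem.Set.add s).filter
          (fun m => !(PySem.Set.contains pvInternalMetrics m) && !pvPreferred.contains m) := by
  intro ts
  induction ts with
  | nil => intro _ s; simp
  | cons t ts ih =>
    intro hsub s
    have ht : t ∈ target := hsub t (by simp)
    have hsub' : ∀ m ∈ ts, m ∈ target := fun m hm => hsub m (by simp [hm])
    simp only [List.foldl_cons]
    have key :
        (if (!((pvHead target ++ s.filter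
                (fun m => !(PySem.Set.contains pvInternalMetrics m) && !pvPreferred.contains m)).contains t)
             && !(PySem.Set.contains pvInternalMetrics t)) = true then
            (pvHead target ++ s.filter
              (fun m => !(PySem.Set.contains pvInternalMetrics m) && !pvPreferred.contains m)) ++ [t]
          else
            pvHead target ++ s.filter
              (fun m => !(PySem.Set.contains pvInternalMetrics m) && !pvPreferred.contains m))
        = pvHead target ++ (PySem.Set.add s t).filter
            (fun m => !(PySem.Set.contains pvInternalMetrics m) && !pvPreferred.contains m) := by
      by_cases hq : t ∈ pvInternalMetrics
      · have hadd : List.filter (fun m => !decide (m ∈ pvInternalMetrics) && !decide (m ∈ pvPreferred))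
            (PySem.Set.add s t)
            = List.filter (fun m => !decide (m ∈ pvInternalMetrics) && !decide (m ∈ pvPreferred)) s := by
          simp only [PySem.Set.add]
          split
          · rfl
          · simp [List.filter_append, hq]
        simp [hq, hadd]
      · by_cases hpref : t ∈ pvPreferred
        · have hthead : t ∈ pvHead target := by
            unfold pvHead
            exact List.mem_filter.mpr ⟨hpref, by simp [ht, hq]⟩
          have hadd : List.filter (fun m => !decide (m ∈ pvInternalMetrics) && !decide (m ∈ pvPreferred))
              (PySem.Set.add s t)
              = List.filter (fun m => !decide (m ∈ pvInternalMetrics) && !decide (m ∈ pvPreferred)) s := by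
            simp only [PySem.Set.add]
            split
            · rfl
            · simp [List.filter_append, hpref]
          simp [hthead, hadd]
        · by_cases hs : t ∈ s
          · simp [hs, hq, hpref]
          · have hnh : t ∉ pvHead target := by
              intro h1
              unfold pvHead at h1
              exact hpref (List.mem_of_mem_filter h1)
            simp [hnh, hs, hq, hpref, List.filter_append]
    rw [key]
    exact ih hsub' (PySem.Set.add s t)

lemma pv_head_eq (target : List String) :
    pvPreferred.filter
      (fun m => ((PySem.List.dedup target).filter
        (fun x => !(PySem.Set.contains pvInternalMetrics x))).contains m)
    = pvHead target := by
  unfold pvHead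
  apply List.filter_congr
  intro m _
  simp [List.mem_filter]

lemma pv_tail_eq (target : List String) :
    ((PySem.List.dedup target).filter
      (fun x => !(PySem.Set.contains pvInternalMetrics x))).filter
      (fun m => !pvPreferred.contains m)
    = (target.foldl PySem.Set.add []).filter
        (fun m => !(PySem.Set.contains pvInternalMetrics m) && !pvPreferred.contains m) := by
  have h1 : PySem.Set.ofList target = target.foldl PySem.Set.add [] := rfl
  rw [List.filter_filter, PySem.List.dedup_eq_ofList, h1]
  apply List.filter_congr
  intro m _
  simp [Bool.and_comm]

-- ===== VERDICT (by name: the statement is the Claim_ definition above) =====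
theorem metric_display_order_spec : Claim_equal_metric_display_order := by
  intro target _
  show metric_display_order target = metric_display_order_alt target
  have hA : metric_display_order target
      = pvHead target ++ (target.foldl PySem.Set.add []).filter
          (fun m => !(PySem.Set.contains pvInternalMetrics m) && !pvPreferred.contains m) := by
    have h := pv_A_fold target target (fun m hm => hm) []
    simpa [metric_display_order, pvHead, pvPreferred] using h
  have hnd : ((PySem.List.dedup target).filter
      (fun x => !(PySem.Set.contains pvInternalMetrics x))).Nodup :=
    List.Nodup.filter _ (PySem.List.nodup_dedup target)
  have hB : metric_display_order_alt target
      = pvPreferred.filter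
          (fun m => ((PySem.List.dedup target).filter
            (fun x => !(PySem.Set.contains pvInternalMetrics x))).contains m)
        ++ ((PySem.List.dedup target).filter
            (fun x => !(PySem.Set.contains pvInternalMetrics x))).filter
            (fun m => !pvPreferred.contains m) := by
    have h := pv_sort_fold _ hnd [] (fun _ => false) (by simp) (by simp) (fun _ _ => rfl)
    simpa [metric_display_order_alt, PySem.List.sorted_eq_foldl_insertBy] using h
  rw [hA, hB, pv_head_eq, pv_tail_eq]
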